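-- pv_equiv track=rewrite | github.com/databricks-solutions/agent-control-plane | control-plane-app/backend/services/topology_service.py | _match_lut
-- ===== SOURCE A (Python) =====
-- from typing import Any, Dict, List, Optional, Set
--
-- def _match_lut(sn: str, lut: Dict[str, str]) -> Optional[str]:
--     """Return node_id for sn using exact → suffix/prefix matching."""
--     sn = sn.strip().lower()
--     if not sn:
--         return None
--     # 1. Exact
--     nid = lut.get(sn)
--     if nid:
--         return nid
--     # 2. sn is a suffix of a lut key  (e.g. span "func" matches key "schema.func")
--     for key, nid in lut.items():
--         if key and (sn == key or key.endswith("." + sn) or key.endswith("/" + sn)):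
--             return nid
--     # 3. a lut key is a suffix of sn  (e.g. span "catalog.schema.func" matches key "func")
--     for key, nid in lut.items():
--         if key and (sn.endswith("." + key) or sn.endswith("/" + key)):
--             return nid
--     return None
-- ===== SOURCE B (Python) =====
-- from typing import Dict, Optional
--
--
-- def _score(sn: str, key: str) -> Optional[int]:
--     """Rank a lut entry: 2 = sn is a dotted/slashed suffix of key (or equal), 3 = key is one of sn."""
--     if not key:
--         return None
--     if sn == key or key.endswith("." + sn) or key.endswith("/" + sn):
--         return 2
--     if sn.endswith("." + key) or sn.endswith("/" + key):
--         return 3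
--     return None
--
--
-- def _match_lut(sn: str, lut: Dict[str, str]) -> Optional[str]:
--     """Score every entry once and keep the minimum (rank, insertion-order) entry."""
--     sn = sn.strip().lower()
--     if not sn:
--         return None
--     nid = lut.get(sn)
--     if nid:
--         return nid
--     best = None  # (rank, node_id); smaller rank wins, earlier entry wins ties
--     for key, nid in lut.items():
--         r = _score(sn, key)
--         if r is None:
--             continue
--         if best is None or r < best[0]:
--             best = (r, nid)
--         if r == 2:
--             break  # rank 2 cannot be beaten
--     return best[1] if best is not None else None
-- ===== Notes on version B (the rewrite author's own statement) =====
-- stated objective: alternative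
-- what changed: Replaces A's two sequential category scans with a single scoring pass: each entry gets a rank (2 = key has sn as dotted suffix, 3 = sn has key as dotted suffix) and the minimum-rank, earliest entry is kept, with an early break on rank 2.
import Mathlib
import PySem

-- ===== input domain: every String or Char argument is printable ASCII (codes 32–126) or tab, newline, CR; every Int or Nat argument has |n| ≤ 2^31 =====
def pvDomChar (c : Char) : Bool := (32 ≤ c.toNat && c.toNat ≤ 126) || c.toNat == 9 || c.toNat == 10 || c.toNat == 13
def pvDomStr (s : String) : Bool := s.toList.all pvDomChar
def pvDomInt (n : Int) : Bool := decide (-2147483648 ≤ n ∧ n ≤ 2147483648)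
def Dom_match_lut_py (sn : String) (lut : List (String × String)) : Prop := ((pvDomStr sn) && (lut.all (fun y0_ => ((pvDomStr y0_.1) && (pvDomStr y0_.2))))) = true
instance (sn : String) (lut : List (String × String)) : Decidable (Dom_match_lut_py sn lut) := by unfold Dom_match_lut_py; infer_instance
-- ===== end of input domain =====

-- B replaces A's two sequential category scans with a single scoring pass (rank 2 / rank 3
-- per entry, minimum rank and earliest entry wins, early break on rank 2); return value only.

-- ===== PORT A =====
-- dict.get: first-match lookup in insertion order
def pvLutGet (lut : List (String × String)) (k : String) : Option String :=
  match lut with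
  | [] => none
  | (key, v) :: rest => if key = k then some v else pvLutGet rest k

-- step 2 loop of A: first key with sn == key or key endswith "."+sn / "/"+sn
def pvALoop2 (sn : String) : List (String × String) → Option String
  | [] => none
  | (key, nid) :: rest =>
    if key ≠ "" ∧ (sn = key ∨ PySem.Str.endswith key ("." ++ sn) = true ∨ PySem.Str.endswith key ("/" ++ sn) = true)
    then some nid else pvALoop2 sn rest

-- step 3 loop of A: first key with sn endswith "."+key / "/"+key
def pvALoop3 (sn : String) : List (String × String) → Option String
  | [] => none
  | (key, nid) :: rest =>
    if key ≠ "" ∧ (PySem.Str.endswith sn ("." ++ key) = true ∨ PySem.Str.endswith sn ("/" ++ key) = true)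
    then some nid else pvALoop3 sn rest

-- steps 2 then 3 (the code after the truthy exact-match check)
def pvASteps23 (sn : String) (lut : List (String × String)) : Option String :=
  match pvALoop2 sn lut with
  | some v => some v
  | none => pvALoop3 sn lut

def match_lut_py (sn : String) (lut : List (String × String)) : Option String :=
  let sn := PySem.Str.lower (PySem.Str.strip sn)
  if sn = "" then none
  else
    match pvLutGet lut sn with
    | some nid => if nid ≠ "" then some nid else pvASteps23 sn lut   -- `if nid:` truthy guard
    | none => pvASteps23 sn lut

-- ===== PORT B =====
-- _score: rank 2 / rank 3 / none per lut key
def pvScore (sn key : String) : Option Nat :=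
  if key = "" then none
  else if sn = key ∨ PySem.Str.endswith key ("." ++ sn) = true ∨ PySem.Str.endswith key ("/" ++ sn) = true then some 2
  else if PySem.Str.endswith sn ("." ++ key) = true ∨ PySem.Str.endswith sn ("/" ++ key) = true then some 3
  else none

-- scoring loop: keep the (rank, node_id) with minimum rank (earliest entry wins ties),
-- break as soon as a rank-2 entry is seen
def pvBBest (sn : String) : List (String × String) → Option (Nat × String) → Option (Nat × String)
  | [], best => best
  | (key, nid) :: rest, best =>
    match pvScore sn key with
    | none => pvBBest sn rest best
    | some r =>
      let best' :=
        match best with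
        | none => some (r, nid)
        | some (rb, nb) => if r < rb then some (r, nid) else some (rb, nb)
      if r = 2 then best'      -- break: rank 2 cannot be beaten
      else pvBBest sn rest best'

def match_lut_py_alt (sn : String) (lut : List (String × String)) : Option String :=
  let sn := PySem.Str.lower (PySem.Str.strip sn)
  if sn = "" then none
  else
    match pvLutGet lut sn with
    | some nid => if nid ≠ "" then some nid else (pvBBest sn lut none).map (·.2)
    | none => (pvBBest sn lut none).map (·.2)

-- ===== PRECONDITION & SPEC =====
def Spec_match_lut_py (sn : String) (lut : List (String × String)) (out : Option String) : Prop := out = match_lut_py_alt sn lut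
instance (sn : String) (lut : List (String × String)) (out : Option String) : Decidable (Spec_match_lut_py sn lut out) := by unfold Spec_match_lut_py; infer_instance

-- ===== CLAIM (what is proved, stated in full; the proofs are below) =====
def Claim_equal_match_lut_py : Prop := ∀ (sn : String) (lut : List (String × String)), Dom_match_lut_py sn lut → Spec_match_lut_py sn lut (match_lut_py sn lut)

-- ===== LEMMAS AND PROOFS =====
lemma pvScore_eq_two (sn key : String) (hk : key ≠ "")
    (h2 : sn = key ∨ PySem.Str.endswith key ("." ++ sn) = true ∨ PySem.Str.endswith key ("/" ++ sn) = true) :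
    pvScore sn key = some 2 := by
  unfold pvScore; rw [if_neg hk, if_pos h2]

lemma pvScore_eq_three (sn key : String) (hk : key ≠ "")
    (h2 : ¬ (sn = key ∨ PySem.Str.endswith key ("." ++ sn) = true ∨ PySem.Str.endswith key ("/" ++ sn) = true))
    (h3 : PySem.Str.endswith sn ("." ++ key) = true ∨ PySem.Str.endswith sn ("/" ++ key) = true) :
    pvScore sn key = some 3 := by
  unfold pvScore; rw [if_neg hk, if_neg h2, if_pos h3]

lemma pvScore_eq_none (sn key : String)
    (h2 : ¬ (sn = key ∨ PySem.Str.endswith key ("." ++ sn) = true ∨ PySem.Str.endswith key ("/" ++ sn) = true))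
    (h3 : ¬ (PySem.Str.endswith sn ("." ++ key) = true ∨ PySem.Str.endswith sn ("/" ++ key) = true)) :
    pvScore sn key = none := by
  unfold pvScore
  by_cases hk : key = ""
  · rw [if_pos hk]
  · rw [if_neg hk, if_neg h2, if_neg h3]

lemma pvBBest_char (sn : String) (l : List (String × String)) (best : Option (Nat × String))
    (hb : ∀ p, best = some p → p.1 = 3) :
    pvBBest sn l best =
      match pvALoop2 sn l with
      | some n => some (2, n)
      | none =>
        match best with
        | some b => some b
        | none => (pvALoop3 sn l).map (fun n => (3, n)) := by
  induction l generalizing best with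
  | nil => cases best <;> rfl
  | cons p rest ih =>
    obtain ⟨key, nid⟩ := p
    simp only [pvBBest, pvALoop2, pvALoop3]
    by_cases hk : key = ""
    · rw [show pvScore sn key = none by unfold pvScore; rw [if_pos hk]]
      rw [if_neg (fun h => h.1 hk), if_neg (fun h => h.1 hk)]
      exact ih best hb
    · by_cases h2 : sn = key ∨ PySem.Str.endswith key ("." ++ sn) = true ∨ PySem.Str.endswith key ("/" ++ sn) = true
      · rw [pvScore_eq_two sn key hk h2, if_pos ⟨hk, h2⟩]
        cases best with
        | none => rfl
        | some b =>
          obtain ⟨rb, nb⟩ := b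
          have h3 : rb = 3 := hb (rb, nb) rfl
          subst h3
          simp
      · by_cases h3 : PySem.Str.endswith sn ("." ++ key) = true ∨ PySem.Str.endswith sn ("/" ++ key) = true
        · rw [pvScore_eq_three sn key hk h2 h3,
            if_neg (fun h => h2 h.2), if_pos ⟨hk, h3⟩]
          cases best with
          | none =>
            simp only [Option.map_some]
            norm_num
            rw [ih (some (3, nid)) (by intro p hp; cases hp <;> rfl)]
          | some b =>
            obtain ⟨rb, nb⟩ := b
            have hrb : rb = 3 := hb (rb, nb) rfl
            subst hrb
            norm_num
            rw [ih (some (3, nb)) (by intro p hp; cases hp <;> rfl)]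
        · rw [pvScore_eq_none sn key h2 h3,
            if_neg (fun h => h2 h.2), if_neg (fun h => h3 h.2)]
          exact ih best hb

lemma pvBBest_eq (sn : String) (lut : List (String × String)) :
    (pvBBest sn lut none).map (·.2) = pvASteps23 sn lut := by
  rw [pvBBest_char sn lut none (by intro p hp; cases hp)]
  unfold pvASteps23
  cases pvALoop2 sn lut with
  | some v => rfl
  | none => cases pvALoop3 sn lut <;> rfl

-- ===== VERDICT (by name: the statement is the Claim_ definition above) =====
theorem match_lut_py_spec : Claim_equal_match_lut_py := by
  intro sn lut _
  unfold Spec_match_lut_py match_lut_py match_lut_py_alt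
  simp only [pvBBest_eq]
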